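-- pv_equiv track=rewrite | github.com/Fjenks/portfolio | python/Reddit Prediction Model.py | getWordCountVector
-- ===== SOURCE A (Python) =====
-- def getWordCountVector(pTopWords, pWordList):
--     countVector = []
--     for i in range(0,160):
--         countVector.append(0)
--
--     for word in pWordList:
--         if word in pTopWords:
--             countVector[pTopWords.index(word)] = countVector[pTopWords.index(word)] + 1
--
--     #add bias:
--     countVector.append(1)
--     return countVector
-- ===== SOURCE B (Python) =====
-- def getWordCountVector(pTopWords, pWordList):
--     # Build a frequency table of the word list once, then scatter each
--     # distinct word's count into the 160-slot vector (plus trailing bias 1).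
--     counts = {}
--     for w in pWordList:
--         counts[w] = counts.get(w, 0) + 1
--     countVector = [0] * 160
--     for w, c in counts.items():
--         if w in pTopWords:
--             countVector[pTopWords.index(w)] = c
--     countVector.append(1)
--     return countVector
-- ===== Notes on version B (the rewrite author's own statement) =====
-- stated objective: alternative
-- what changed: B builds a frequency dictionary of pWordList in one pass and then scatters each distinct word's count into the vector, instead of A's per-occurrence membership test and pTopWords.index scan for every word of the list.
import Mathlib
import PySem

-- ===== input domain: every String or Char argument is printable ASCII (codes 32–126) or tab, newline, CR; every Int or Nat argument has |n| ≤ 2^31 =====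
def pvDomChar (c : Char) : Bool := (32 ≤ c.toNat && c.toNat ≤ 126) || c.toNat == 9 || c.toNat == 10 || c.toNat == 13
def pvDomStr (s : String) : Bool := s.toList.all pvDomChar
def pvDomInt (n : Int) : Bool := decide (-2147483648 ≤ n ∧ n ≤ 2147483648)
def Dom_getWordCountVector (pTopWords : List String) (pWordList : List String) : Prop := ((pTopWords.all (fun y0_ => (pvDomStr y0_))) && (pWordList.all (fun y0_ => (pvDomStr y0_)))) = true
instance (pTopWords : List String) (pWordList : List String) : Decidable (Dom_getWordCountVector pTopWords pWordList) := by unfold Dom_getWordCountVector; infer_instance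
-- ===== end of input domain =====

-- B builds a frequency dictionary once and scatters each distinct word's count into the
-- vector, instead of A's per-occurrence membership test and index scan; proved equal on Pre_.

set_option maxRecDepth 10000


-- ===== PORT A =====
-- one loop iteration of A: if word in pTopWords: countVector[idx] = countVector[idx] + 1
def pvStepA (pTopWords : List String) (vec : List Int) (word : String) : List Int :=
  if word ∈ pTopWords then
    match PySem.List.index? pTopWords word with
    | some i => vec.set i (vec.getD i 0 + 1)
    | none => vec
  else vec

def getWordCountVector (pTopWords : List String) (pWordList : List String) : List Int :=
  let countVector : List Int := (PySem.List.pyRange 0 160 1).foldl (fun acc _ => acc ++ [0]) []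
  let countVector := pWordList.foldl (pvStepA pTopWords) countVector
  countVector ++ [1]

-- ===== PORT B =====
-- one scatter step of B: if w in pTopWords: countVector[pTopWords.index(w)] = c
def pvScatterB (pTopWords : List String) (vec : List Int) (p : String × Int) : List Int :=
  if p.1 ∈ pTopWords then
    match PySem.List.index? pTopWords p.1 with
    | some i => vec.set i p.2
    | none => vec
  else vec

def getWordCountVector_alt (pTopWords : List String) (pWordList : List String) : List Int :=
  let counts := pWordList.foldl (fun d w => d.insert w (d.getD w 0 + 1))
                  (PySem.Dict.empty (κ := String) (ν := Int))
  let countVector : List Int := List.replicate 160 0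
  let countVector := counts.items.foldl (pvScatterB pTopWords) countVector
  countVector ++ [1]

-- ===== PRECONDITION & SPEC =====
-- Pre_ excludes exactly the inputs where Python A raises IndexError: some word of pWordList
-- occurs in pTopWords but its first occurrence is at index ≥ 160 (B raises there too).
def Pre_getWordCountVector (pTopWords : List String) (pWordList : List String) : Prop :=
  ∀ w ∈ pWordList, w ∈ pTopWords → w ∈ pTopWords.take 160
instance (pTopWords : List String) (pWordList : List String) : Decidable (Pre_getWordCountVector pTopWords pWordList) := by unfold Pre_getWordCountVector; infer_instance

def pvWitness_getWordCountVector : List String × List String := (["the", "a"], ["a", "the", "a", "zz"])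

def Spec_getWordCountVector (pTopWords : List String) (pWordList : List String) (out : List Int) : Prop := out = getWordCountVector_alt pTopWords pWordList
instance (pTopWords : List String) (pWordList : List String) (out : List Int) : Decidable (Spec_getWordCountVector pTopWords pWordList out) := by unfold Spec_getWordCountVector; infer_instance

-- ===== CLAIM (what is proved, stated in full; the proofs are below) =====
def Claim_equal_getWordCountVector : Prop := ∀ (pTopWords : List String) (pWordList : List String), Dom_getWordCountVector pTopWords pWordList → Pre_getWordCountVector pTopWords pWordList → Spec_getWordCountVector pTopWords pWordList (getWordCountVector pTopWords pWordList)

-- ===== LEMMAS AND PROOFS =====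

-- A's step preserves the vector length.
lemma pvStepA_length (T : List String) (v : List Int) (w : String) :
    (pvStepA T v w).length = v.length := by
  unfold pvStepA; split
  · cases h : PySem.List.index? T w <;> simp
  · rfl

lemma pvFoldA_length (T : List String) (L : List String) (v : List Int) :
    (L.foldl (pvStepA T) v).length = v.length := by
  induction L generalizing v with
  | nil => rfl
  | cons w L ih => simp [List.foldl_cons, ih, pvStepA_length]

-- characterisation of A's fold at index j
lemma pvFoldA_getD (T : List String) (L : List String) (v : List Int) (j : Nat)
    (hj : j < v.length) :
    (L.foldl (pvStepA T) v).getD j 0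
      = v.getD j 0 + (L.countP (fun w => PySem.List.index? T w == some j) : Int) := by
  induction L generalizing v with
  | nil => simp
  | cons w L ih =>
    simp only [List.foldl_cons, List.countP_cons]
    by_cases hw : w ∈ T
    · obtain ⟨i, hi⟩ := Option.isSome_iff_exists.mp
        ((PySem.List.index?_isSome_iff T w).mpr hw)
      have hstep : pvStepA T v w = v.set i (v.getD i 0 + 1) := by
        unfold pvStepA; rw [if_pos hw, hi]
      have hlen : (pvStepA T v w).length = v.length := pvStepA_length T v w
      rw [hstep]
      rw [ih (v.set i (v.getD i 0 + 1)) (by simpa using hj)]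
      have hset : (v.set i (v.getD i 0 + 1)).getD j 0
          = v.getD j 0 + (if i = j then 1 else 0) := by
        by_cases hij : i = j
        · subst hij
          simp [List.getD_eq_getElem?_getD, hj]
        · simp [List.getD_eq_getElem?_getD, hij]
      rw [hset, hi]
      by_cases hij : i = j <;> simp [hij] <;> ring
    · have hidx : PySem.List.index? T w = none :=
        (PySem.List.index?_eq_none_iff T w).mpr hw
      simp only [pvStepA, if_neg hw]
      rw [ih v hj, hidx]
      simp

-- B's scatter step preserves the vector length.
lemma pvScatterB_length (T : List String) (v : List Int) (p : String × Int) :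
    (pvScatterB T v p).length = v.length := by
  unfold pvScatterB; split
  · cases h : PySem.List.index? T p.1 <;> simp
  · rfl

-- if no pair targets index j, the scatter fold leaves position j unchanged
lemma pvFoldB_skip (T : List String) (ps : List (String × Int)) (v : List Int) (j : Nat)
    (h : ∀ p ∈ ps, PySem.List.index? T p.1 ≠ some j) :
    (ps.foldl (pvScatterB T) v).getD j 0 = v.getD j 0 := by
  induction ps generalizing v with
  | nil => rfl
  | cons p ps ih =>
    simp only [List.foldl_cons]
    rw [ih _ (fun q hq => h q (List.mem_cons_of_mem _ hq))]
    unfold pvScatterB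
    split
    · cases hi : PySem.List.index? T p.1 with
      | none => rfl
      | some i =>
        have : i ≠ j := fun hij => h p (List.mem_cons_self) (hij ▸ hi)
        simp [List.getD_eq_getElem?_getD, this]
    · rfl

-- characterisation of B's scatter fold at index j (keys pairwise distinct)
lemma pvFoldB_getD (T : List String) (ps : List (String × Int)) (v : List Int) (j : Nat)
    (hj : j < v.length) (hnd : (ps.map Prod.fst).Nodup) :
    (ps.foldl (pvScatterB T) v).getD j 0
      = ((ps.find? (fun p => PySem.List.index? T p.1 == some j)).map Prod.snd).getD
          (v.getD j 0) := by
  induction ps generalizing v with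
  | nil => rfl
  | cons p ps ih =>
    simp only [List.map_cons, List.nodup_cons] at hnd
    by_cases hp : PySem.List.index? T p.1 = some j
    · -- p writes j; no later pair can target j (its key would equal p.1)
      have hpT : p.1 ∈ T := (PySem.List.index?_isSome_iff T p.1).mp (by rw [hp]; rfl)
      obtain ⟨hjT, hTj, _⟩ := PySem.List.getElem_of_index?_eq_some hp
      have hstep : pvScatterB T v p = v.set j p.2 := by
        unfold pvScatterB; rw [if_pos hpT, hp]
      have hnone : ∀ q ∈ ps, PySem.List.index? T q.1 ≠ some j := by
        intro q hq hqj
        obtain ⟨_, hTq, _⟩ := PySem.List.getElem_of_index?_eq_some hqj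
        exact hnd.1 (by simpa [hTq ▸ hTj] using List.mem_map_of_mem (f := Prod.fst) hq)
      simp only [List.foldl_cons, hstep]
      rw [pvFoldB_skip T ps _ j hnone]
      have : (v.set j p.2).getD j 0 = p.2 := by
        simp [List.getD_eq_getElem?_getD, hj]
      rw [this, List.find?_cons_of_pos (by exact beq_iff_eq.mpr hp)]
      rfl
    · simp only [List.foldl_cons]
      have hlen : (pvScatterB T v p).length = v.length := pvScatterB_length T v p
      rw [ih _ (by omega) hnd.2]
      have hkeep : (pvScatterB T v p).getD j 0 = v.getD j 0 := by
        unfold pvScatterB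
        split
        · cases hi : PySem.List.index? T p.1 with
          | none => rfl
          | some i =>
            have : i ≠ j := fun hij => hp (hij ▸ hi)
            simp [List.getD_eq_getElem?_getD, this]
        · rfl
      rw [hkeep, List.find?_cons_of_neg (by simpa using hp)]

-- A's initial vector of 160 appended zeros is replicate 160 0
lemma pvZeros_eq :
    (PySem.List.pyRange 0 160 1).foldl (fun (acc : List Int) _ => acc ++ [0]) []
      = List.replicate 160 0 := by decide

-- the two per-index values agree
lemma pvIndex_agree (T W : List String) (j : Nat) :
    (W.countP (fun w => PySem.List.index? T w == some j) : Int)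
      = ((((PySem.Set.ofList W).map (fun k => (k, (W.count k : Int)))).find?
            (fun p => PySem.List.index? T p.1 == some j)).map Prod.snd).getD 0 := by
  cases hf : ((PySem.Set.ofList W).map (fun k => (k, (W.count k : Int)))).find?
      (fun p => PySem.List.index? T p.1 == some j) with
  | none =>
    have hnone := List.find?_eq_none.mp hf
    have : ∀ w ∈ W, ¬ (PySem.List.index? T w == some j) = true := by
      intro w hw hwj
      exact hnone (w, (W.count w : Int))
        (List.mem_map_of_mem (f := fun k => (k, (W.count k : Int)))
          ((PySem.Set.mem_ofList W w).mpr hw)) (by simpa using hwj)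
    rw [List.countP_eq_zero.mpr this]
    simp
  | some p =>
    have hpred := List.find?_some hf
    have hpj : PySem.List.index? T p.1 = some j := by simp at hpred; exact hpred
    have hmem : p ∈ (PySem.Set.ofList W).map (fun k => (k, (W.count k : Int))) :=
      List.mem_of_find?_eq_some hf
    obtain ⟨k, hk, hkp⟩ := List.mem_map.mp hmem
    have hk1 : p.1 = k := by rw [← hkp]
    have hkj : PySem.List.index? T k = some j := hk1 ▸ hpj
    obtain ⟨hjT, hTk, -⟩ := PySem.List.getElem_of_index?_eq_some hkj
    have hcongr : ∀ w ∈ W, (PySem.List.index? T w == some j) = (w == k) := by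
      intro w _
      by_cases hwk : w = k
      · subst hwk; rw [hkj]; simp
      · have hne : PySem.List.index? T w ≠ some j := by
          intro hwj
          obtain ⟨hw1, hTw, hw3⟩ := PySem.List.getElem_of_index?_eq_some hwj
          exact hwk (by rw [← hTw]; exact hTk)
        rw [beq_eq_false_iff_ne.mpr hne, beq_eq_false_iff_ne.mpr hwk]
    have hp2 : p.2 = (W.count k : Int) := by rw [← hkp]
    rw [List.countP_congr (fun w hw => by rw [hcongr w hw])]
    simp only [Option.map_some, Option.getD_some, hp2]
    simp [List.count]

lemma pvFoldB_length (T : List String) (ps : List (String × Int)) (v : List Int) :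
    (ps.foldl (pvScatterB T) v).length = v.length := by
  induction ps generalizing v with
  | nil => rfl
  | cons p ps ih => simp [List.foldl_cons, ih, pvScatterB_length]

-- ===== VERDICT (by name: the statement is the Claim_ definition above) =====
theorem getWordCountVector_spec : Claim_equal_getWordCountVector := by
  intro T W _ _
  unfold Spec_getWordCountVector getWordCountVector getWordCountVector_alt
  rw [pvZeros_eq, PySem.Dict.foldl_insert_getD_add_one_eq_counter]
  show (W.foldl (pvStepA T) (List.replicate 160 0)) ++ [1]
      = ((PySem.Dict.counter W).items.foldl (pvScatterB T) (List.replicate 160 0)) ++ [1]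
  rw [PySem.Dict.items_counter]
  congr 1
  have hlenA : (W.foldl (pvStepA T) (List.replicate 160 (0 : Int))).length = 160 := by
    rw [pvFoldA_length]; simp
  have hlenB : (((PySem.Set.ofList W).map (fun k => (k, (W.count k : Int)))).foldl
      (pvScatterB T) (List.replicate 160 (0 : Int))).length = 160 := by
    rw [pvFoldB_length]; simp
  apply List.ext_getElem (by omega)
  intro j hja hjb
  have hj : j < 160 := by omega
  have hjv : j < (List.replicate 160 (0 : Int)).length := by simp [hj]
  have hA := pvFoldA_getD T W (List.replicate 160 0) j hjv
  have hnd : ((((PySem.Set.ofList W).map (fun k => (k, (W.count k : Int))))).map Prod.fst).Nodup := by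
    simp [List.map_map, Function.comp_def, PySem.Set.nodup_ofList W]
  have hB := pvFoldB_getD T ((PySem.Set.ofList W).map (fun k => (k, (W.count k : Int))))
      (List.replicate 160 0) j hjv hnd
  have hAe : (W.foldl (pvStepA T) (List.replicate 160 (0 : Int))).getD j 0
      = (W.foldl (pvStepA T) (List.replicate 160 (0 : Int)))[j] := by
    rw [List.getD_eq_getElem _ _ hja]
  have hBe : (((PySem.Set.ofList W).map (fun k => (k, (W.count k : Int)))).foldl
        (pvScatterB T) (List.replicate 160 (0 : Int))).getD j 0
      = (((PySem.Set.ofList W).map (fun k => (k, (W.count k : Int)))).foldl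
        (pvScatterB T) (List.replicate 160 (0 : Int)))[j] := by
    rw [List.getD_eq_getElem _ _ hjb]
  rw [← hAe, ← hBe, hA, hB]
  have h0 : (List.replicate 160 (0 : Int)).getD j 0 = 0 := by
    rw [List.getD_eq_getElem _ _ hjv, List.getElem_replicate]
  rw [h0, zero_add]
  exact pvIndex_agree T W j
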